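-- pv_equiv track=rewrite | github.com/RenanSerrano123/sum-of-1-s-neighbors | sumof1'sneighbors.py | calcular_soma_vizinhos
-- ===== SOURCE A (Python) =====
-- def calcular_soma_vizinhos(vetor):
--     soma = 0
--     for i in range(len(vetor)):
--         if vetor[i] == 1:
--             if i > 0:
--                 soma += vetor[i - 1]
--             if i < len(vetor) - 1:
--                 soma += vetor[i + 1]
--     return soma
-- ===== SOURCE B (Python) =====
-- def calcular_soma_vizinhos(vetor):
--     # Receiver-centric mask/shift/dot: each element contributes its value once
--     # per neighbouring 1.  Stage 1: indicator mask of the 1s.  Stage 2: shift the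
--     # mask both ways to count, per position, how many neighbours are 1.
--     # Stage 3: dot product of the vector with that neighbour-count.
--     mask = [1 if x == 1 else 0 for x in vetor]
--     right_is_one = mask[1:] + [0]
--     left_is_one = [0] + mask[:-1]
--     return sum(v * (r + l) for v, r, l in zip(vetor, right_is_one, left_is_one))
-- ===== Notes on version B (the rewrite author's own statement) =====
-- stated objective: alternative
-- what changed: B flips the direction of the computation: instead of scanning for elements equal to 1 and adding their neighbours (giver-centric, with index boundary guards), B builds an indicator mask of the 1s, shifts it left and right to get each position's count of neighbouring 1s, and returns the dot product of the vector with that count (receiver-centric, staged passes, no index arithmetic).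
import Mathlib
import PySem

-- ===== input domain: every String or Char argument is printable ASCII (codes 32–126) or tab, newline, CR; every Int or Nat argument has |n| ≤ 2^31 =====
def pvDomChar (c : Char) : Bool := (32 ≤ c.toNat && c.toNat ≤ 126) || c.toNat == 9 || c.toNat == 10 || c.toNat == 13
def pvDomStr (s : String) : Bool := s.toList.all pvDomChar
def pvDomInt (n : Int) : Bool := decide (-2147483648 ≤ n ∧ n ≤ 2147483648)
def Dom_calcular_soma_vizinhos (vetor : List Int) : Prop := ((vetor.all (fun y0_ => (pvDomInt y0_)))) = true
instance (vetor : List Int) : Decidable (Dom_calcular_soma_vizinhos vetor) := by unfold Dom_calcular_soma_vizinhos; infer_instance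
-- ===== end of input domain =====

-- B is receiver-centric: an indicator mask of the 1s is shifted both ways and dotted with the vector, instead of A's giver-centric index scan with boundary guards; same O(n) cost, different decomposition.

-- ===== PORT A =====
def calcular_soma_vizinhos (vetor : List Int) : Int :=
  (PySem.List.pyRange 0 (vetor.length : Int) 1).foldl
    (fun soma i =>
      if PySem.List.pyGetD vetor i 0 = 1 then
        let soma1 := if i > 0 then soma + PySem.List.pyGetD vetor (i - 1) 0 else soma
        if i < (vetor.length : Int) - 1 then soma1 + PySem.List.pyGetD vetor (i + 1) 0 else soma1
      else soma) 0

-- ===== PORT B =====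
def calcular_soma_vizinhos_alt (vetor : List Int) : Int :=
  let mask := vetor.map (fun x => if x = 1 then (1 : Int) else 0)
  let right_is_one := PySem.List.slice mask (some 1) none ++ [0]
  let left_is_one := 0 :: PySem.List.slice mask none (some (-1))
  ((vetor.zip (right_is_one.zip left_is_one)).map
    (fun t => t.1 * (t.2.1 + t.2.2))).sum

-- ===== PRECONDITION & SPEC =====
def Spec_calcular_soma_vizinhos (vetor : List Int) (out : Int) : Prop := out = calcular_soma_vizinhos_alt vetor
instance (vetor : List Int) (out : Int) : Decidable (Spec_calcular_soma_vizinhos vetor out) := by unfold Spec_calcular_soma_vizinhos; infer_instance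

-- ===== CLAIM (what is proved, stated in full; the proofs are below) =====
def Claim_equal_calcular_soma_vizinhos : Prop := ∀ (vetor : List Int), Dom_calcular_soma_vizinhos vetor → Spec_calcular_soma_vizinhos vetor (calcular_soma_vizinhos vetor)

-- ===== LEMMAS AND PROOFS =====

-- the sum over adjacent pairs that both programs compute
def pvE (xs : List Int) : Int :=
  ((xs.zip xs.tail).map
    (fun p => (if p.1 = 1 then p.2 else 0) + (if p.2 = 1 then p.1 else 0))).sum

-- folding "add a term" is summing the mapped terms
theorem pv_foldl_add {α : Type} (h : α → Int) (l : List α) (c : Int) :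
    l.foldl (fun s x => s + h x) c = c + (l.map h).sum := by
  induction l generalizing c with
  | nil => simp
  | cons x t ih => simp [List.foldl_cons, ih (c + h x)]; ring

-- the zip of a list with its tail, as a map over positions
theorem pv_zip_tail_eq (g : Int → Int → Int) :
    ∀ (xs : List Int),
      ((xs.zip xs.tail).map (fun p => g p.1 p.2)) =
        (List.range (xs.length - 1)).map
          (fun i => g (xs.getD i 0) (xs.getD (i + 1) 0)) := by
  intro xs
  match xs with
  | [] => simp
  | [a] => simp
  | a :: b :: t =>
    have ih := pv_zip_tail_eq g (b :: t)
    simp only [List.zip_cons_cons, List.tail_cons, List.map_cons] at ih ⊢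
    rw [show (a :: b :: t).length - 1 = ((b :: t).length - 1) + 1 by simp,
        List.range_succ_eq_map, List.map_cons, List.map_map]
    simp only [Function.comp_def, List.getD_cons_zero, List.getD_cons_succ] at ih ⊢
    rw [ih]

-- B's masked dot product with a carried "previous element is 1" flag equals the edge sum
theorem pv_B_gen :
    ∀ (v : List Int) (p : Int),
      ((v.zip ((((v.map (fun x => if x = 1 then (1 : Int) else 0)).tail) ++ [0]).zip
          (p :: (v.map (fun x => if x = 1 then (1 : Int) else 0)).dropLast))).map
        (fun t => t.1 * (t.2.1 + t.2.2))).sum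
      = (match v with | [] => 0 | x :: _ => x * p) + pvE v := by
  intro v p
  match v with
  | [] => simp [pvE]
  | [x] => simp [pvE]
  | x :: y :: t =>
    have ih := pv_B_gen (y :: t) (if x = 1 then (1 : Int) else 0)
    simp only [List.map_cons, List.tail_cons, List.cons_append, List.zip_cons_cons,
      List.dropLast_cons₂, List.sum_cons] at ih ⊢
    rw [ih]
    simp only [pvE, List.zip_cons_cons, List.tail_cons, List.map_cons, List.sum_cons]
    split_ifs <;> ring

theorem pv_B_eq_E (xs : List Int) : calcular_soma_vizinhos_alt xs = pvE xs := by
  show ((xs.zip (((PySem.List.slice (xs.map (fun x => if x = 1 then (1 : Int) else 0)) (some 1) none) ++ [0]).zip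
      (0 :: PySem.List.slice (xs.map (fun x => if x = 1 then (1 : Int) else 0)) none (some (-1))))).map
    (fun t => t.1 * (t.2.1 + t.2.2))).sum = pvE xs
  rw [PySem.List.slice_from_one, PySem.List.slice_to_neg_one]
  rw [pv_B_gen xs 0]
  match xs with
  | [] => simp
  | x :: t => simp

theorem pvE_range (xs : List Int) :
    pvE xs =
      ((List.range (xs.length - 1)).map
        (fun i => (if xs.getD i 0 = 1 then xs.getD (i + 1) 0 else 0) +
                  (if xs.getD (i + 1) 0 = 1 then xs.getD i 0 else 0))).sum := by
  unfold pvE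
  rw [show ((xs.zip xs.tail).map fun p : Int × Int => (if p.1 = 1 then p.2 else 0) + (if p.2 = 1 then p.1 else 0)) =
      ((xs.zip xs.tail).map fun p : Int × Int =>
        (fun a b => (if a = 1 then b else 0) + (if b = 1 then a else 0)) p.1 p.2) from rfl]
  rw [pv_zip_tail_eq (fun a b => (if a = 1 then b else 0) + (if b = 1 then a else 0)) xs]

theorem pv_A_eq (xs : List Int) :
    calcular_soma_vizinhos xs =
      ((List.range xs.length).map
        (fun k => (if 0 < k ∧ xs.getD k 0 = 1 then xs.getD (k - 1) 0 else 0) +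
                  (if (k : Int) < (xs.length : Int) - 1 ∧ xs.getD k 0 = 1 then xs.getD (k + 1) 0 else 0))).sum := by
  unfold calcular_soma_vizinhos
  have hb : (fun (soma : Int) (i : Int) =>
      if PySem.List.pyGetD xs i 0 = 1 then
        let soma1 := if i > 0 then soma + PySem.List.pyGetD xs (i - 1) 0 else soma
        if i < (xs.length : Int) - 1 then soma1 + PySem.List.pyGetD xs (i + 1) 0 else soma1
      else soma) =
      (fun s i => s + ((if i > 0 ∧ PySem.List.pyGetD xs i 0 = 1 then PySem.List.pyGetD xs (i - 1) 0 else 0) +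
                       (if i < (xs.length : Int) - 1 ∧ PySem.List.pyGetD xs i 0 = 1 then PySem.List.pyGetD xs (i + 1) 0 else 0))) := by
    funext s i; simp only []; split_ifs <;> first | tauto | ring
  rw [hb, pv_foldl_add]
  rw [PySem.List.pyRange_one, List.map_map]
  simp only [Int.sub_zero, Int.toNat_natCast, Function.comp_def, zero_add]
  congr 1
  apply List.map_congr_left
  intro k hk
  simp only [List.mem_range] at hk
  congr 1
  · by_cases hp : 0 < k
    · have h1 : ((k : Int) - 1) = ((k - 1 : Nat) : Int) := by omega
      simp only [h1, PySem.List.pyGetD_natCast, gt_iff_lt, Int.natCast_pos]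
    · have hk0 : k = 0 := by omega
      subst hk0; simp
  · have h1 : ((k : Int) + 1) = ((k + 1 : Nat) : Int) := by push_cast; ring
    simp only [h1, PySem.List.pyGetD_natCast]

theorem pv_main (xs : List Int) :
    calcular_soma_vizinhos xs = calcular_soma_vizinhos_alt xs := by
  rw [pv_A_eq, pv_B_eq_E, pvE_range]
  match xs with
  | [] => simp
  | a :: t =>
    rw [PySem.List.sum_map_add_int, PySem.List.sum_map_add_int, add_comm]
    have hlen : (a :: t).length = t.length + 1 := by simp
    congr 1
    · -- right-neighbour contributions of A = E's first addend
      rw [hlen, Nat.add_sub_cancel, List.range_succ, List.map_append, List.map_singleton,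
          List.sum_append, List.sum_singleton]
      have hz : ¬((t.length : Int) < ((t.length + 1 : Nat) : Int) - 1 ∧ (a :: t).getD t.length 0 = 1) := by
        intro h
        have := h.1
        omega
      rw [if_neg hz, add_zero]
      apply congrArg
      apply List.map_congr_left
      intro i hi
      simp only [List.mem_range] at hi
      simp [hi]
    · -- left-neighbour contributions of A = E's second addend
      rw [hlen, Nat.add_sub_cancel, List.range_succ_eq_map, List.map_cons, List.sum_cons, List.map_map]
      simp only [Nat.lt_irrefl, false_and, if_false, zero_add, Function.comp_def]
      apply congrArg
      apply List.map_congr_left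
      intro i hi
      simp

-- ===== VERDICT (by name: the statement is the Claim_ definition above) =====
theorem calcular_soma_vizinhos_spec : Claim_equal_calcular_soma_vizinhos := by
  intro vetor _
  unfold Spec_calcular_soma_vizinhos
  exact pv_main vetor
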